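-- pv_equiv track=rewrite | github.com/yasincayci/RLE-Image-Compression | src/rle_image_compression/scans.py | unflatten_col_major
-- ===== SOURCE A (Python) =====
-- from typing import Iterable, List, Sequence, Tuple
--
-- Matrix = List[List[int]]
--
-- def unflatten_col_major(values: Sequence[int], width: int, height: int) -> Matrix:
--     output = [[0 for _ in range(width)] for _ in range(height)]
--     idx = 0
--     for x in range(width):
--         if x % 2 == 0:
--             for y in range(height):
--                 output[y][x] = values[idx]
--                 idx += 1
--         else:
--             for y in range(height - 1, -1, -1):
--                 output[y][x] = values[idx]
--                 idx += 1
--     return output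
-- ===== SOURCE B (Python) =====
-- def unflatten_col_major(values, width, height):
--     cols = []
--     for x in range(width):
--         col = list(values[x * height:(x + 1) * height])
--         if x % 2:
--             col.reverse()
--         cols.append(col)
--     return [[cols[x][y] for x in range(width)] for y in range(height)]
-- ===== Notes on version B (the rewrite author's own statement) =====
-- stated objective: alternative
-- what changed: B builds the matrix in two staged passes - slice values into columns, reverse the odd-indexed columns, then transpose the column list into rows - instead of A's cell-by-cell mutation of a preallocated matrix with nested column loops, a direction flip and a running index.
import Mathlib
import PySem

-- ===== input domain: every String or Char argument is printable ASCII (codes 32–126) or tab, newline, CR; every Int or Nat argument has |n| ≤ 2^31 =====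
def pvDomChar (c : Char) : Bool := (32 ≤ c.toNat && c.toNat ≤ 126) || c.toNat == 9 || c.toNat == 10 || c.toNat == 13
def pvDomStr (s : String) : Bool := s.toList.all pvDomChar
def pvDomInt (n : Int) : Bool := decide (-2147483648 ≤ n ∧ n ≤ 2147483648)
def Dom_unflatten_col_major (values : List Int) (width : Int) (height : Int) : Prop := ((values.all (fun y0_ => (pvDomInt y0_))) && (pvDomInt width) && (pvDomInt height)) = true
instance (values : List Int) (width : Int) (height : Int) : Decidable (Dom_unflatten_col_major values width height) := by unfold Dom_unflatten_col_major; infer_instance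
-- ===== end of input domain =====

-- B replaces A's cell-by-cell mutation of a preallocated matrix (nested column loops with a
-- direction flip and a running index) by two staged passes: slice the values into columns,
-- reverse the odd-indexed columns, then transpose the column list into rows. Same cost.

-- ===== PORT A =====
-- output[y][x] = v  (indices always in range where the ports are used under Pre_)
def setCell (rows : List (List Int)) (y x : Int) (v : Int) : List (List Int) :=
  PySem.List.pySetD rows y (PySem.List.pySetD (PySem.List.pyGetD rows y []) x v)

def unflatten_col_major (values : List Int) (width : Int) (height : Int) : List (List Int) :=
  let output := (PySem.List.pyRange 0 height 1).map
      (fun _ => (PySem.List.pyRange 0 width 1).map (fun _ => (0 : Int)))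
  let st := (PySem.List.pyRange 0 width 1).foldl
      (fun (st : List (List Int) × Int) x =>
        if PySem.Int.mod x 2 == 0 then
          (PySem.List.pyRange 0 height 1).foldl
            (fun st2 y => (setCell st2.1 y x (PySem.List.pyGetD values st2.2 0), st2.2 + 1)) st
        else
          (PySem.List.pyRange (height - 1) (-1) (-1)).foldl
            (fun st2 y => (setCell st2.1 y x (PySem.List.pyGetD values st2.2 0), st2.2 + 1)) st)
      (output, 0)
  st.1

-- ===== PORT B =====
def unflatten_col_major_alt (values : List Int) (width : Int) (height : Int) : List (List Int) :=
  let cols := (PySem.List.pyRange 0 width 1).foldl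
      (fun cols x =>
        let col := PySem.List.slice values (some (x * height)) (some ((x + 1) * height))
        let col := if PySem.Int.mod x 2 == 0 then col else col.reverse  -- `if x % 2: col.reverse()`
        cols ++ [col])
      []
  (PySem.List.pyRange 0 height 1).map (fun y =>
    (PySem.List.pyRange 0 width 1).map (fun x =>
      PySem.List.pyGetD (PySem.List.pyGetD cols x []) y 0))

-- ===== PRECONDITION & SPEC =====
-- Pre_ excludes exactly the inputs where A raises IndexError: width > 0 and height > 0 but
-- fewer than width*height values.
def Pre_unflatten_col_major (values : List Int) (width : Int) (height : Int) : Prop :=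
  width ≤ 0 ∨ height ≤ 0 ∨ width * height ≤ (values.length : Int)
instance (values : List Int) (width : Int) (height : Int) : Decidable (Pre_unflatten_col_major values width height) := by unfold Pre_unflatten_col_major; infer_instance

def pvWitness_unflatten_col_major : List Int × Int × Int := ([1, 2, 3, 4, 5, 6], 3, 2)

def Spec_unflatten_col_major (values : List Int) (width : Int) (height : Int) (out : List (List Int)) : Prop := out = unflatten_col_major_alt values width height
instance (values : List Int) (width : Int) (height : Int) (out : List (List Int)) : Decidable (Spec_unflatten_col_major values width height out) := by unfold Spec_unflatten_col_major; infer_instance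

-- ===== CLAIM (what is proved, stated in full; the proofs are below) =====
def Claim_equal_unflatten_col_major : Prop := ∀ (values : List Int) (width : Int) (height : Int), Dom_unflatten_col_major values width height → Pre_unflatten_col_major values width height → Spec_unflatten_col_major values width height (unflatten_col_major values width height)

-- ===== LEMMAS AND PROOFS =====

-- an h×w matrix given by a per-cell function
def mm (h w : Int) (f : Int → Int → Int) : List (List Int) :=
  (PySem.List.pyRange 0 h 1).map (fun y => (PySem.List.pyRange 0 w 1).map (fun x => f y x))

-- the value A writes (and B reads) at cell (y, x)
def gcell (values : List Int) (h x y : Int) : Int :=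
  PySem.List.pyGetD values (x * h + (if PySem.Int.mod x 2 == 0 then y else h - 1 - y)) 0

theorem mm_congr (h w : Int) (f g : Int → Int → Int)
    (hfg : ∀ y x, 0 ≤ y → y < h → 0 ≤ x → x < w → f y x = g y x) : mm h w f = mm h w g := by
  unfold mm
  refine List.map_congr_left (fun y hy => ?_)
  rw [PySem.List.mem_pyRange_one] at hy
  refine List.map_congr_left (fun x hx => ?_)
  rw [PySem.List.mem_pyRange_one] at hx
  exact hfg y x hy.1 hy.2 hx.1 hx.2

theorem set_map_pyRange {α : Type} (f : Int → α) (n i : Int) (v : α)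
    (h0 : 0 ≤ i) (_hn : i < n) :
    (((PySem.List.pyRange 0 n 1).map f).set i.toNat v)
      = (PySem.List.pyRange 0 n 1).map (fun j => if j = i then v else f j) := by
  apply List.ext_getElem
  · simp
  · intro k hk1 hk2
    simp only [List.length_set, List.length_map, PySem.List.length_pyRange_one] at hk1
    simp only [List.getElem_set, List.getElem_map, PySem.List.getElem_pyRange_one]
    have hiff : i.toNat = k ↔ (0 : Int) + (k : Int) = i := by omega
    by_cases hki : i.toNat = k
    · rw [if_pos hki, if_pos (hiff.mp hki)]
    · rw [if_neg hki, if_neg (fun h => hki (hiff.mpr h))]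

theorem setCell_mm (h w y x v : Int) (f : Int → Int → Int)
    (hy0 : 0 ≤ y) (hyh : y < h) (hx0 : 0 ≤ x) (hxw : x < w) :
    setCell (mm h w f) y x v
      = mm h w (fun y' x' => if y' = y ∧ x' = x then v else f y' x') := by
  unfold setCell mm
  rw [PySem.List.pySetD_of_nonneg _ _ hy0,
      PySem.List.pyGetD_map_pyRange_of_nonneg _ _ _ _ hy0 hyh,
      PySem.List.pySetD_of_nonneg _ _ hx0,
      set_map_pyRange _ _ _ _ hx0 hxw,
      set_map_pyRange _ _ _ _ hy0 hyh]
  refine List.map_congr_left (fun y' hy' => ?_)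
  rw [PySem.List.mem_pyRange_one] at hy'
  beta_reduce
  by_cases hyy : y' = y
  · rw [if_pos hyy]
    refine List.map_congr_left (fun x' hx' => ?_)
    beta_reduce
    by_cases hxx : x' = x
    · rw [if_pos hxx, if_pos ⟨hyy, hxx⟩]
    · rw [if_neg hxx, if_neg (fun h => hxx h.2), hyy]
  · rw [if_neg hyy]
    refine List.map_congr_left (fun x' hx' => ?_)
    beta_reduce
    rw [if_neg (fun h => hyy h.1)]

-- column x filled for rows y < k (ascending pass), on top of columns < x done
def FcUp (values : List Int) (h x k : Int) (y x' : Int) : Int :=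
  if x' < x ∨ (x' = x ∧ y < k) then gcell values h x' y else 0

-- column x filled for rows y ≥ k (descending pass), on top of columns < x done
def FcDn (values : List Int) (h x k : Int) (y x' : Int) : Int :=
  if x' < x ∨ (x' = x ∧ k ≤ y) then gcell values h x' y else 0

theorem col_even (values : List Int) (h w x : Int) (hh : 0 < h)
    (hx0 : 0 ≤ x) (hxw : x < w) (hpar : (PySem.Int.mod x 2 == 0) = true) :
    ∀ (n : Nat) (k : Int), 0 ≤ k → k + n = h →
      (PySem.List.pyRange k h 1).foldl
          (fun st2 y => (setCell st2.1 y x (PySem.List.pyGetD values st2.2 0), st2.2 + 1))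
          (mm h w (FcUp values h x k), x * h + k)
        = (mm h w (FcUp values h x h), x * h + h) := by
  intro n
  induction n with
  | zero =>
    intro k hk0 hkh
    have : k = h := by omega
    subst this
    rw [PySem.List.pyRange_one_eq_nil le_rfl]
    rfl
  | succ m ih =>
    intro k hk0 hkh
    have hkh' : k < h := by omega
    rw [PySem.List.pyRange_one_cons hkh']
    simp only [List.foldl_cons]
    rw [setCell_mm h w k x _ _ hk0 hkh' hx0 hxw]
    have hstep : mm h w (fun y' x' => if y' = k ∧ x' = x then PySem.List.pyGetD values (x * h + k) 0
        else FcUp values h x k y' x') = mm h w (FcUp values h x (k + 1)) := by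
      refine mm_congr h w _ _ (fun y' x' hy0 hyh hx0' hxw' => ?_)
      unfold FcUp
      by_cases hc : y' = k ∧ x' = x
      · rw [if_pos hc, if_pos (Or.inr ⟨hc.2, by omega⟩)]
        unfold gcell
        rw [hc.1, hc.2, hpar]
        rfl
      · rw [if_neg hc]
        by_cases hd : x' < x ∨ (x' = x ∧ y' < k + 1)
        · rw [if_pos hd, if_pos ?_]
          rcases hd with hd | ⟨hd1, hd2⟩
          · exact Or.inl hd
          · exact Or.inr ⟨hd1, by by_contra hy; exact hc ⟨by omega, hd1⟩⟩
        · rw [if_neg hd, if_neg (fun h => hd (h.imp id (fun ⟨a, b⟩ => ⟨a, by omega⟩)))]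
    rw [hstep]
    have := ih (k + 1) (by omega) (by omega)
    rw [show x * h + k + 1 = x * h + (k + 1) by ring]
    exact this

theorem col_odd (values : List Int) (h w x : Int) (_hh : 0 < h)
    (hx0 : 0 ≤ x) (hxw : x < w) (hpar : (PySem.Int.mod x 2 == 0) = false) :
    ∀ (n : Nat) (j : Int), j < h → j + 1 = (n : Int) →
      (PySem.List.pyRange j (-1) (-1)).foldl
          (fun st2 y => (setCell st2.1 y x (PySem.List.pyGetD values st2.2 0), st2.2 + 1))
          (mm h w (FcDn values h x (j + 1)), x * h + (h - 1 - j))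
        = (mm h w (FcDn values h x 0), x * h + h) := by
  intro n
  induction n with
  | zero =>
    intro j hjh hj
    have : j = -1 := by omega
    subst this
    rw [PySem.List.pyRange_neg_one_eq_nil (by omega)]
    simp only [List.foldl_nil]
    norm_num
  | succ m ih =>
    intro j hjh hj
    have hj0 : 0 ≤ j := by omega
    rw [PySem.List.pyRange_neg_one_cons (by omega : (-1 : Int) < j)]
    simp only [List.foldl_cons]
    rw [setCell_mm h w j x _ _ hj0 hjh hx0 hxw]
    have hstep : mm h w (fun y' x' => if y' = j ∧ x' = x then
          PySem.List.pyGetD values (x * h + (h - 1 - j)) 0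
        else FcDn values h x (j + 1) y' x') = mm h w (FcDn values h x j) := by
      refine mm_congr h w _ _ (fun y' x' hy0 hyh hx0' hxw' => ?_)
      unfold FcDn
      by_cases hc : y' = j ∧ x' = x
      · rw [if_pos hc, if_pos (Or.inr ⟨hc.2, by omega⟩)]
        unfold gcell
        rw [hc.1, hc.2, hpar]
        rfl
      · rw [if_neg hc]
        by_cases hd : x' < x ∨ (x' = x ∧ j ≤ y')
        · rw [if_pos hd, if_pos ?_]
          rcases hd with hd | ⟨hd1, hd2⟩
          · exact Or.inl hd
          · exact Or.inr ⟨hd1, by by_contra hy; exact hc ⟨by omega, hd1⟩⟩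
        · rw [if_neg hd, if_neg (fun h => hd (h.imp id (fun ⟨a, b⟩ => ⟨a, by omega⟩)))]
    rw [hstep]
    have := ih (j - 1) (by omega) (by omega)
    rw [show j - 1 + 1 = j by ring, show x * h + (h - 1 - (j - 1)) = x * h + (h - 1 - j) + 1 by ring]
      at this
    exact this

theorem col_even_full (values : List Int) (h w x : Int) (hh : 0 < h)
    (hx0 : 0 ≤ x) (hxw : x < w) (hpar : (PySem.Int.mod x 2 == 0) = true) :
    (PySem.List.pyRange 0 h 1).foldl
        (fun st2 y => (setCell st2.1 y x (PySem.List.pyGetD values st2.2 0), st2.2 + 1))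
        (mm h w (FcUp values h x 0), x * h)
      = (mm h w (FcUp values h x h), x * h + h) := by
  have := col_even values h w x hh hx0 hxw hpar h.toNat 0 le_rfl (by omega)
  rw [show x * h + 0 = x * h by ring] at this
  exact this

theorem col_odd_full (values : List Int) (h w x : Int) (hh : 0 < h)
    (hx0 : 0 ≤ x) (hxw : x < w) (hpar : (PySem.Int.mod x 2 == 0) = false) :
    (PySem.List.pyRange (h - 1) (-1) (-1)).foldl
        (fun st2 y => (setCell st2.1 y x (PySem.List.pyGetD values st2.2 0), st2.2 + 1))
        (mm h w (FcDn values h x h), x * h)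
      = (mm h w (FcDn values h x 0), x * h + h) := by
  have := col_odd values h w x hh hx0 hxw hpar h.toNat (h - 1) (by omega) (by omega)
  rw [show h - 1 + 1 = h by ring, show x * h + (h - 1 - (h - 1)) = x * h by ring] at this
  exact this

-- columns < p done, the rest still 0
def Fdone (values : List Int) (h p : Int) (y x' : Int) : Int :=
  if x' < p then gcell values h x' y else 0

theorem FcUp_zero (values : List Int) (h w x : Int) :
    mm h w (Fdone values h x) = mm h w (FcUp values h x 0) := by
  refine mm_congr h w _ _ (fun y x' hy0 _ _ _ => ?_)
  unfold Fdone FcUp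
  by_cases hd : x' < x
  · rw [if_pos hd, if_pos (Or.inl hd)]
  · rw [if_neg hd, if_neg (by rintro (h | ⟨_, h⟩) <;> omega)]

theorem FcUp_full (values : List Int) (h w x : Int) :
    mm h w (FcUp values h x h) = mm h w (Fdone values h (x + 1)) := by
  refine mm_congr h w _ _ (fun y x' hy0 hyh _ _ => ?_)
  unfold Fdone FcUp
  by_cases hd : x' < x + 1
  · rw [if_pos hd]
    by_cases he : x' < x
    · rw [if_pos (Or.inl he)]
    · rw [if_pos (Or.inr ⟨by omega, by omega⟩)]
  · rw [if_neg hd, if_neg (by rintro (h | ⟨h, _⟩) <;> omega)]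

theorem FcDn_full (values : List Int) (h w x : Int) :
    mm h w (Fdone values h x) = mm h w (FcDn values h x h) := by
  refine mm_congr h w _ _ (fun y x' hy0 hyh _ _ => ?_)
  unfold Fdone FcDn
  by_cases hd : x' < x
  · rw [if_pos hd, if_pos (Or.inl hd)]
  · rw [if_neg hd, if_neg (by rintro (h | ⟨_, h⟩) <;> omega)]

theorem FcDn_zero (values : List Int) (h w x : Int) :
    mm h w (FcDn values h x 0) = mm h w (Fdone values h (x + 1)) := by
  refine mm_congr h w _ _ (fun y x' hy0 hyh _ _ => ?_)
  unfold Fdone FcDn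
  by_cases hd : x' < x + 1
  · rw [if_pos hd]
    by_cases he : x' < x
    · rw [if_pos (Or.inl he)]
    · rw [if_pos (Or.inr ⟨by omega, by omega⟩)]
  · rw [if_neg hd, if_neg (by rintro (h | ⟨h, _⟩) <;> omega)]

theorem outer (values : List Int) (w h : Int) (hh : 0 < h) :
    ∀ (n : Nat) (x : Int), 0 ≤ x → x + n = w →
      (PySem.List.pyRange x w 1).foldl
          (fun (st : List (List Int) × Int) x =>
            if PySem.Int.mod x 2 == 0 then
              (PySem.List.pyRange 0 h 1).foldl
                (fun st2 y => (setCell st2.1 y x (PySem.List.pyGetD values st2.2 0), st2.2 + 1)) st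
            else
              (PySem.List.pyRange (h - 1) (-1) (-1)).foldl
                (fun st2 y => (setCell st2.1 y x (PySem.List.pyGetD values st2.2 0), st2.2 + 1)) st)
          (mm h w (Fdone values h x), x * h)
        = (mm h w (Fdone values h w), w * h) := by
  intro n
  induction n with
  | zero =>
    intro x hx0 hxw
    have : x = w := by omega
    subst this
    rw [PySem.List.pyRange_one_eq_nil le_rfl]
    rfl
  | succ m ih =>
    intro x hx0 hxw
    have hxw' : x < w := by omega
    rw [PySem.List.pyRange_one_cons hxw']
    simp only [List.foldl_cons]
    by_cases hpar : (PySem.Int.mod x 2 == 0) = true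
    · rw [if_pos hpar, FcUp_zero values h w x,
          col_even_full values h w x hh hx0 hxw' hpar,
          FcUp_full values h w x]
      have := ih (x + 1) (by omega) (by omega)
      rw [show (x + 1) * h = x * h + h by ring] at this
      exact this
    · rw [if_neg (by simpa using hpar), FcDn_full values h w x,
          col_odd_full values h w x hh hx0 hxw' (by simpa using hpar),
          FcDn_zero values h w x]
      have := ih (x + 1) (by omega) (by omega)
      rw [show (x + 1) * h = x * h + h by ring] at this
      exact this

-- B's column x, as a function of the row index
theorem alt_cols (values : List Int) (w h : Int) :
    (PySem.List.pyRange 0 w 1).foldl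
        (fun cols x =>
          cols ++ [if PySem.Int.mod x 2 == 0 then
              PySem.List.slice values (some (x * h)) (some ((x + 1) * h))
            else (PySem.List.slice values (some (x * h)) (some ((x + 1) * h))).reverse])
        []
      = (PySem.List.pyRange 0 w 1).map (fun x =>
          if PySem.Int.mod x 2 == 0 then
            PySem.List.slice values (some (x * h)) (some ((x + 1) * h))
          else (PySem.List.slice values (some (x * h)) (some ((x + 1) * h))).reverse) := by
  rw [PySem.List.foldl_append_singleton_eq_map]
  rfl

theorem slice_entry (values : List Int) (s h y : Int) (hh : 0 < h) (hs : 0 ≤ s)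
    (hy0 : 0 ≤ y) (hyh : y < h) (hlen : s + h ≤ (values.length : Int)) :
    PySem.List.pyGetD (PySem.List.slice values (some s) (some (s + h))) y 0
      = PySem.List.pyGetD values (s + y) 0 := by
  rw [PySem.List.slice_toNat values hs (by omega)]
  have hlen2 : (List.take ((s + h).toNat - s.toNat) (List.drop s.toNat values)).length
      = h.toNat := by
    simp only [List.length_take, List.length_drop]
    omega
  rw [PySem.List.pyGetD_eq_getElem _ 0 hy0 (by rw [hlen2]; omega),
      List.getElem_take, List.getElem_drop,
      PySem.List.pyGetD_eq_getElem values 0 (by omega) (by omega)]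
  congr 1
  omega

theorem slice_entry_rev (values : List Int) (s h y : Int) (hh : 0 < h) (hs : 0 ≤ s)
    (hy0 : 0 ≤ y) (hyh : y < h) (hlen : s + h ≤ (values.length : Int)) :
    PySem.List.pyGetD (PySem.List.slice values (some s) (some (s + h))).reverse y 0
      = PySem.List.pyGetD values (s + (h - 1 - y)) 0 := by
  rw [PySem.List.slice_toNat values hs (by omega)]
  rw [PySem.List.pyGetD_eq_getElem _ 0 hy0
        (by simp only [List.length_reverse, List.length_take, List.length_drop]; omega)]
  rw [List.getElem_reverse, List.getElem_take, List.getElem_drop,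
      PySem.List.pyGetD_eq_getElem values 0 (by omega) (by omega)]
  congr 1
  simp only [List.length_take, List.length_drop]
  omega

theorem col_entry (values : List Int) (h x y : Int) (hh : 0 < h)
    (hx0 : 0 ≤ x) (hy0 : 0 ≤ y) (hyh : y < h)
    (hlen : (x + 1) * h ≤ (values.length : Int)) :
    PySem.List.pyGetD
        (if PySem.Int.mod x 2 == 0 then
            PySem.List.slice values (some (x * h)) (some ((x + 1) * h))
          else (PySem.List.slice values (some (x * h)) (some ((x + 1) * h))).reverse)
        y 0
      = gcell values h x y := by
  have hring : (x + 1) * h = x * h + h := by ring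
  have hs : 0 ≤ x * h := mul_nonneg hx0 (le_of_lt hh)
  have hlen' : x * h + h ≤ (values.length : Int) := by rw [← hring]; exact hlen
  unfold gcell
  by_cases hpar : (PySem.Int.mod x 2 == 0) = true
  · rw [if_pos hpar, if_pos hpar, hring,
        slice_entry values (x * h) h y hh hs hy0 hyh hlen']
  · rw [if_neg (by simpa using hpar), if_neg (by simpa using hpar), hring,
        slice_entry_rev values (x * h) h y hh hs hy0 hyh hlen']

-- ===== VERDICT (by name: the statement is the Claim_ definition above) =====
theorem unflatten_col_major_spec : Claim_equal_unflatten_col_major := by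
  intro values width height _hdom hpre
  unfold Spec_unflatten_col_major
  by_cases hh : 0 < height
  · by_cases hw : 0 < width
    · -- main case: both sides are the matrix with cell (y, x) = gcell values height x y
      have hlen : width * height ≤ (values.length : Int) := by
        rcases hpre with h | h | h
        · omega
        · omega
        · exact h
      have hA : unflatten_col_major values width height
          = mm height width (Fdone values height width) := by
        unfold unflatten_col_major
        have hinit : (PySem.List.pyRange 0 height 1).map
            (fun _ => (PySem.List.pyRange 0 width 1).map (fun _ => (0 : Int)))
            = mm height width (Fdone values height 0) := by
          refine (mm_congr height width _ _ (fun y x _ _ hx0 _ => ?_)).symm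
          unfold Fdone
          rw [if_neg (by omega)]
        rw [hinit]
        have hout := outer values width height hh width.toNat 0 le_rfl (by omega)
        rw [zero_mul] at hout
        exact congrArg Prod.fst hout
      rw [hA]
      show mm height width (Fdone values height width) = _
      simp only [unflatten_col_major_alt]
      rw [alt_cols values width height]
      unfold mm
      refine List.map_congr_left (fun y hy => ?_)
      rw [PySem.List.mem_pyRange_one] at hy
      beta_reduce
      refine List.map_congr_left (fun x hx => ?_)
      rw [PySem.List.mem_pyRange_one] at hx
      beta_reduce
      rw [PySem.List.pyGetD_map_pyRange_of_nonneg _ _ _ _ hx.1 hx.2,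
          col_entry values height x y hh hx.1 hy.1 hy.2 (by nlinarith)]
      unfold Fdone
      rw [if_pos hx.2]
    · -- width ≤ 0: no columns on either side
      unfold unflatten_col_major unflatten_col_major_alt
      rw [PySem.List.pyRange_one_eq_nil (by omega : width ≤ 0)]
      simp
  · -- height ≤ 0: both sides are []
    unfold unflatten_col_major unflatten_col_major_alt
    rw [PySem.List.pyRange_one_eq_nil (by omega : height ≤ 0),
        PySem.List.pyRange_neg_one_eq_nil (by omega : height - 1 ≤ -1)]
    simp only [List.map_nil, List.foldl_nil, ite_self]
    rw [List.foldl_fixed]
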